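-- pv_equiv track=rewrite | github.com/grace-stoddart/character_extraction | src/animacy.py | get_LOC_ORG_positions
-- ===== SOURCE A (Python) =====
-- def get_LOC_ORG_positions(nerParses, sentences):
--     positions = []
--
--     tokenOffset = 0
--
--     for i, nerParse in enumerate(nerParses):
--
--         for j, tag in enumerate(nerParse['tags']):
--             if 'LOC' in tag or 'ORG' in tag:
--                 positions.append(j + tokenOffset)
--
--         tokenOffset += len(sentences[i]['tokens'])
--
--     return positions
-- ===== SOURCE B (Python) =====
-- def get_LOC_ORG_positions(nerParses, sentences):
--     # Back-to-front: fold over the (parse, sentence) pairs from the end; each step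
--     # shifts the already-collected positions by the current sentence's token count
--     # and prepends the current parse's local hit indices. No running offset needed.
--     result = []
--     for parse, sent in zip(reversed(nerParses), reversed(sentences[:len(nerParses)])):
--         shift = len(sent['tokens'])
--         result = [j for j, tag in enumerate(parse['tags'])
--                   if 'LOC' in tag or 'ORG' in tag] + [p + shift for p in result]
--     return result
-- ===== Notes on version B (the rewrite author's own statement) =====
-- stated objective: alternative
-- what changed: B drops A's forward pass with a running token-offset accumulator and instead folds over the (parse, sentence) pairs from the END, shifting the already-collected positions by the current sentence's token count and prepending the current parse's local hit indices, so no global offset is ever computed.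
import Mathlib
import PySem

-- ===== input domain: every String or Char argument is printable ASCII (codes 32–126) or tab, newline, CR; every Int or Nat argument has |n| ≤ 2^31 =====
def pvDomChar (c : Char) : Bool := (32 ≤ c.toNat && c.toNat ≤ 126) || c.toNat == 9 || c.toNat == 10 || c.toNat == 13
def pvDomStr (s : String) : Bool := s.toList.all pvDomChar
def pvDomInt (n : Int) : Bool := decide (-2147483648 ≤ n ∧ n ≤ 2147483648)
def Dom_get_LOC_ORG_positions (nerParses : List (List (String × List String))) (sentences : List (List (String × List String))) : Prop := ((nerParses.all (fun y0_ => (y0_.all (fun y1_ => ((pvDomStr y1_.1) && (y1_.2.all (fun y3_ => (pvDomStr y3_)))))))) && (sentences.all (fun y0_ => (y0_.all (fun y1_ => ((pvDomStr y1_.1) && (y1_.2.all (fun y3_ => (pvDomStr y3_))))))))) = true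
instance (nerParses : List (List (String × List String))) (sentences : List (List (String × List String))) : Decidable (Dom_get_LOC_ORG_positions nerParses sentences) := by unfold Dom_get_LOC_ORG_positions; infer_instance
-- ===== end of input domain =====

-- B replaces A's forward pass with a running token offset by a back-to-front fold over the
-- (parse, sentence) pairs that shifts the already-collected positions on the way back
-- (objective: alternative decomposition, same result, no offset accumulator).

-- dict lookup on the association list (Python d[k] = first match; KeyError = none, excluded by Pre_)
def pvLookup (d : List (String × List String)) (k : String) : Option (List String) :=
  (d.find? (fun p => p.1 == k)).map (·.2)

-- ===== PORT A =====
-- literal port of A; d['tags'] / sentences[i]['tokens'] are totalized with .getD []: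
-- Pre_ excludes exactly the inputs where those lookups raise in Python.
def get_LOC_ORG_positions (nerParses : List (List (String × List String))) (sentences : List (List (String × List String))) : List Int :=
  (((PySem.List.enumerate nerParses).foldl
    (fun (st : List Int × Int) ip =>
      let tags := (pvLookup ip.2 "tags").getD []
      let positions := (PySem.List.enumerate tags).foldl
        (fun acc jt =>
          if PySem.Str.isIn "LOC" jt.2 || PySem.Str.isIn "ORG" jt.2 then acc ++ [jt.1 + st.2] else acc)
        st.1
      (positions,
        st.2 + ((((PySem.List.pyGet? sentences ip.1).bind (fun s => pvLookup s "tokens")).getD []).length : Int)))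
    ([], 0)).1)

-- ===== PORT B =====
-- literal port of Source B: zip(reversed(nerParses), reversed(sentences[:len(nerParses)])) folded with
-- 'result = hits + [p + shift for p in result]'; the same lookups are totalized with .getD [].
def get_LOC_ORG_positions_alt (nerParses : List (List (String × List String))) (sentences : List (List (String × List String))) : List Int :=
  (nerParses.reverse.zip (PySem.List.slice sentences none (some (nerParses.length : Int))).reverse).foldl
    (fun (result : List Int) ps =>
      let shift : Int := (((pvLookup ps.2 "tokens").getD []).length : Int)
      ((PySem.List.enumerate ((pvLookup ps.1 "tags").getD [])).filterMap
        (fun jt => if PySem.Str.isIn "LOC" jt.2 || PySem.Str.isIn "ORG" jt.2 then some jt.1 else none))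
        ++ result.map (· + shift))
    []

-- ===== PRECONDITION & SPEC =====
-- Pre_ = exactly the inputs where Python A returns: enough sentences (IndexError otherwise)
-- and the 'tags' / 'tokens' keys present where accessed (KeyError otherwise).
def Pre_get_LOC_ORG_positions (nerParses : List (List (String × List String))) (sentences : List (List (String × List String))) : Prop :=
  nerParses.length ≤ sentences.length ∧
  (∀ p ∈ nerParses, (pvLookup p "tags").isSome) ∧
  (∀ s ∈ sentences.take nerParses.length, (pvLookup s "tokens").isSome)
instance (nerParses : List (List (String × List String))) (sentences : List (List (String × List String))) : Decidable (Pre_get_LOC_ORG_positions nerParses sentences) := by unfold Pre_get_LOC_ORG_positions; infer_instance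

def pvWitness_get_LOC_ORG_positions : (List (List (String × List String))) × (List (List (String × List String))) :=
  ([[("tags", ["B-LOC", "O", "I-ORG"])]], [[("tokens", ["a", "b"])]])

def Spec_get_LOC_ORG_positions (nerParses : List (List (String × List String))) (sentences : List (List (String × List String))) (out : List Int) : Prop := out = get_LOC_ORG_positions_alt nerParses sentences
instance (nerParses : List (List (String × List String))) (sentences : List (List (String × List String))) (out : List Int) : Decidable (Spec_get_LOC_ORG_positions nerParses sentences out) := by unfold Spec_get_LOC_ORG_positions; infer_instance

-- ===== CLAIM (what is proved, stated in full; the proofs are below) =====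
def Claim_equal_get_LOC_ORG_positions : Prop := ∀ (nerParses : List (List (String × List String))) (sentences : List (List (String × List String))), Dom_get_LOC_ORG_positions nerParses sentences → Pre_get_LOC_ORG_positions nerParses sentences → Spec_get_LOC_ORG_positions nerParses sentences (get_LOC_ORG_positions nerParses sentences)

-- ===== LEMMAS AND PROOFS =====

-- token count of one sentence record
def pvTokOf (s : List (String × List String)) : Int := (((pvLookup s "tokens").getD []).length : Int)

-- local hit indices of one parse
def pvHits (p : List (String × List String)) : List Int :=
  (PySem.List.enumerate ((pvLookup p "tags").getD [])).filterMap
    (fun jt => if PySem.Str.isIn "LOC" jt.2 || PySem.Str.isIn "ORG" jt.2 then some jt.1 else none)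

-- B's reference semantics on the forward pair list: head hits, then the tail shifted
def pvF : List ((List (String × List String)) × (List (String × List String))) → List Int
  | [] => []
  | (p, s) :: rest => pvHits p ++ (pvF rest).map (· + pvTokOf s)

-- A's reference semantics on the forward pair list with an explicit offset
def pvG : List ((List (String × List String)) × (List (String × List String))) → Int → List Int
  | [], _ => []
  | (p, s) :: rest, off => (pvHits p).map (· + off) ++ pvG rest (off + pvTokOf s)

theorem pv_foldl_filterMap (off : Int) (l : List (Int × String)) (acc : List Int) :
    l.foldl (fun acc jt =>
        if PySem.Str.isIn "LOC" jt.2 || PySem.Str.isIn "ORG" jt.2 then acc ++ [jt.1 + off] else acc) acc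
      = acc ++ (l.filterMap (fun jt =>
        if PySem.Str.isIn "LOC" jt.2 || PySem.Str.isIn "ORG" jt.2 then some jt.1 else none)).map (· + off) := by
  induction l generalizing acc with
  | nil => simp
  | cons x xs ih =>
    simp only [List.foldl_cons, List.filterMap_cons]
    by_cases h : (PySem.Str.isIn "LOC" x.2 || PySem.Str.isIn "ORG" x.2) = true
    · rw [if_pos h, if_pos h, ih]; simp
    · rw [if_neg h, if_neg h, ih]

-- A's fold computes pvG over the zip of the parses with the corresponding sentences
theorem portA_eq_pvG (sentences : List (List (String × List String))) :
    ∀ (parses : List (List (String × List String))) (n : Nat) (acc : List Int) (off : Int),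
    n + parses.length ≤ sentences.length →
    ((PySem.List.enumerate parses (n : Int)).foldl
      (fun (st : List Int × Int) ip =>
        let tags := (pvLookup ip.2 "tags").getD []
        let positions := (PySem.List.enumerate tags).foldl
          (fun acc jt =>
            if PySem.Str.isIn "LOC" jt.2 || PySem.Str.isIn "ORG" jt.2 then acc ++ [jt.1 + st.2] else acc)
          st.1
        (positions,
          st.2 + ((((PySem.List.pyGet? sentences ip.1).bind (fun s => pvLookup s "tokens")).getD []).length : Int)))
      (acc, off)).1 = acc ++ pvG (parses.zip (sentences.drop n)) off := by
  intro parses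
  induction parses with
  | nil => intro n acc off _; simp [PySem.List.enumerate_nil, pvG]
  | cons p ps ih =>
    intro n acc off hlen
    rw [PySem.List.enumerate_cons]
    simp only [List.foldl_cons]
    have hc : ((n : Int) + 1) = ((n + 1 : Nat) : Int) := by push_cast; ring
    rw [hc, ih (n + 1) _ _ (by simp at hlen ⊢; omega)]
    rw [pv_foldl_filterMap]
    have hn : n < sentences.length := by simp at hlen; omega
    have hdrop : sentences.drop n = sentences[n] :: sentences.drop (n + 1) :=
      List.drop_eq_getElem_cons hn
    have hget : PySem.List.pyGet? sentences (n : Int) = some sentences[n] := by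
      rw [PySem.List.pyGet?_natCast]; simp [hn]
    rw [hdrop]
    simp only [List.zip_cons_cons, pvG, pvHits, pvTokOf, hget, Option.bind,
      List.append_assoc]

-- pvG is pvF shifted
theorem pvG_eq_pvF_map :
    ∀ (l : List ((List (String × List String)) × (List (String × List String)))) (off : Int),
    pvG l off = (pvF l).map (· + off) := by
  intro l
  induction l with
  | nil => intro off; simp [pvG, pvF]
  | cons x rest ih =>
    intro off
    obtain ⟨p, s⟩ := x
    simp only [pvG, pvF, List.map_append, List.map_map, ih]
    congr 1
    apply List.map_congr_left
    intro a _
    simp [Function.comp]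
    ring

-- B's fold over the REVERSED pair list computes pvF of the forward list
theorem foldlB_reverse_eq_pvF :
    ∀ (l : List ((List (String × List String)) × (List (String × List String)))),
    l.reverse.foldl
      (fun (result : List Int) ps =>
        let shift : Int := (((pvLookup ps.2 "tokens").getD []).length : Int)
        ((PySem.List.enumerate ((pvLookup ps.1 "tags").getD [])).filterMap
          (fun jt => if PySem.Str.isIn "LOC" jt.2 || PySem.Str.isIn "ORG" jt.2 then some jt.1 else none))
          ++ result.map (· + shift))
      [] = pvF l := by
  intro l
  induction l with
  | nil => simp [pvF]
  | cons x rest ih =>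
    obtain ⟨p, s⟩ := x
    rw [List.reverse_cons, List.foldl_append, ih]
    simp [pvF, pvHits, pvTokOf]

-- zip of reverses = reverse of zip (equal lengths)
theorem pv_zip_reverse {α β : Type} :
    ∀ (l1 : List α) (l2 : List β), l1.length = l2.length →
    l1.reverse.zip l2.reverse = (l1.zip l2).reverse := by
  intro l1
  induction l1 with
  | nil => intro l2 h; simp
  | cons a t1 ih =>
    intro l2 h
    cases l2 with
    | nil => simp at h
    | cons b t2 =>
      have h' : t1.length = t2.length := by simpa using h
      simp only [List.reverse_cons, List.zip_cons_cons]
      rw [List.zip_append (by simpa using h'), ih t2 h']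
      simp

-- zipping with a take of at least the left length changes nothing
theorem pv_zip_take_self {α β : Type} :
    ∀ (l1 : List α) (l2 : List β), l1.zip (l2.take l1.length) = l1.zip l2 := by
  intro l1
  induction l1 with
  | nil => intro l2; simp
  | cons a t1 ih =>
    intro l2
    cases l2 with
    | nil => simp
    | cons b t2 => simp [ih]

theorem ports_agree (nerParses sentences : List (List (String × List String)))
    (hlen : nerParses.length ≤ sentences.length) :
    get_LOC_ORG_positions nerParses sentences = get_LOC_ORG_positions_alt nerParses sentences := by
  unfold get_LOC_ORG_positions get_LOC_ORG_positions_alt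
  have hA := portA_eq_pvG sentences nerParses 0 [] 0 (by simpa using hlen)
  simp only [Nat.cast_zero] at hA
  rw [hA, List.drop_zero, List.nil_append, pvG_eq_pvF_map]
  rw [PySem.List.slice_to_natCast]
  rw [pv_zip_reverse nerParses (sentences.take nerParses.length)
    (by rw [List.length_take]; omega)]
  rw [pv_zip_take_self, foldlB_reverse_eq_pvF]
  simp

-- ===== VERDICT (by name: the statement is the Claim_ definition above) =====
theorem get_LOC_ORG_positions_spec : Claim_equal_get_LOC_ORG_positions := by
  intro nerParses sentences _ hpre
  unfold Spec_get_LOC_ORG_positions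
  exact ports_agree nerParses sentences hpre.1
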